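-- pv_equiv track=rewrite | github.com/fborzi/programacion-actividad4 | pareja14/Funciones.py | digitos_repetidos
-- ===== SOURCE A (Python) =====
-- def digitos_repetidos(n):
--     """retorna una lista con los numeros que se repiten mas de 1 vez"""
--     n = str(abs(n))
--     vistos = set()
--     repetidos = set()
--     for d in n:
--         if d in vistos:
--             repetidos.add(int(d))
--         else:
--             vistos.add(d)
--     return list(repetidos)
-- ===== SOURCE B (Python) =====
-- def digitos_repetidos(n):
--     """retorna una lista con los numeros que se repiten mas de 1 vez"""
--     rest = list(str(abs(n)))
--     for d in set(rest):
--         rest.remove(d)          # drop one copy of each distinct digit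
--     return list(set(int(d) for d in rest))
-- ===== Notes on version B (the rewrite author's own statement) =====
-- stated objective: alternative
-- what changed: Replaces A's online two-set seen/repeated detection by a multiset-difference decomposition: drop one copy of each distinct digit from the digit list and pour the leftover (exactly the repeated occurrences) into a set.
import Mathlib
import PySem

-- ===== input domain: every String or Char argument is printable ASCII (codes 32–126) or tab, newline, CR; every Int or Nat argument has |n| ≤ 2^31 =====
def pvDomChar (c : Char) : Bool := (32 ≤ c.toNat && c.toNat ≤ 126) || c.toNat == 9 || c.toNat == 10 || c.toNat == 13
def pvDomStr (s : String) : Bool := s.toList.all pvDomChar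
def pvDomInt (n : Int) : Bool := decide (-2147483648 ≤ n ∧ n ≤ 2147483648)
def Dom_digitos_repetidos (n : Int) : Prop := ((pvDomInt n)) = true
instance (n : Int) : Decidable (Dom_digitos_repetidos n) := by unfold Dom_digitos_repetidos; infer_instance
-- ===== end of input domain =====

-- B replaces A's online two-set seen/repeated detection by a multiset difference: remove one copy of
-- each distinct digit, the leftovers are exactly the repeated occurrences; the return value is proved
-- equal everywhere (same cost class, 'alternative').

-- Shared hand-ported primitives (both Pythons call int(d) and list(<set of digit ints>)):

-- int(d) for a single character; total form — every char fed to it here is a decimal digit of str(abs(n)).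
def pyDigitInt (d : Char) : Int := (PySem.Int.ofChars? [d]).getD 0

-- list(s) for a CPython set s of small non-negative ints given by its sequence of .add calls.
-- Hand port, exact for values 0..9 (validated exhaustively against CPython for every add sequence):
-- open addressing in an 8-slot table, hash(v) = v, probe i -> (5*i+1) % 8 (the perturb term
-- hash >> 5 is 0 for these values); once a 5th distinct element arrives CPython resizes to a
-- 32-slot table in which digits collide nowhere, so iteration order is ascending.
def pyProbeIns (t : List (Option Int)) (v : Int) : Nat → Nat → List (Option Int)
  | 0, _ => t
  | fuel + 1, i =>
    match t.getD i none with
    | none => t.set i (some v)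
    | some w => if w = v then t else pyProbeIns t v fuel ((5 * i + 1) % 8)

def pySetList (xs : List Int) : List Int :=
  if 5 ≤ (PySem.List.dedup xs).length then
    PySem.List.sorted (PySem.List.dedup xs) (fun x => x) false
  else
    (xs.foldl (fun t v => pyProbeIns t v 8 (v.toNat % 8)) (List.replicate 8 none)).filterMap id

-- ===== PORT A =====
-- A's repetidos set is represented by its sequence of .add calls (second state component);
-- list(repetidos) at the end is pySetList of that sequence.
def digitos_repetidos (n : Int) : List Int :=
  let s := PySem.Int.toChars |n|
  let r := s.foldl
    (fun (st : PySem.Set Char × List Int) d =>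
      if PySem.Set.contains st.1 d then (st.1, st.2 ++ [pyDigitInt d])
      else (PySem.Set.add st.1 d, st.2))
    (PySem.Set.empty, [])
  pySetList r.2

-- ===== PORT B =====
-- rest.remove(d); the none branch (ValueError) is unreachable: each distinct digit of rest0 is
-- still present when its own single removal happens.
def remStep (r : List Char) (d : Char) : List Char :=
  match PySem.List.remove? r d with
  | some r' => r'
  | none => r

-- 'for d in set(rest): rest.remove(d)' — the result does not depend on the set's iteration order
-- (the removals of distinct values commute), so folding over PySem.Set.ofList is exact.
def digitos_repetidos_alt (n : Int) : List Int :=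
  let rest0 := PySem.Int.toChars |n|
  let rest := (PySem.Set.ofList rest0).foldl remStep rest0
  pySetList (rest.map pyDigitInt)

-- ===== PRECONDITION & SPEC =====
def Spec_digitos_repetidos (n : Int) (out : List Int) : Prop := out = digitos_repetidos_alt n
instance (n : Int) (out : List Int) : Decidable (Spec_digitos_repetidos n out) := by unfold Spec_digitos_repetidos; infer_instance

-- ===== CLAIM (what is proved, stated in full; the proofs are below) =====
def Claim_equal_digitos_repetidos : Prop := ∀ (n : Int), Dom_digitos_repetidos n → Spec_digitos_repetidos n (digitos_repetidos n)

-- ===== LEMMAS AND PROOFS =====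

-- the stream of repeated occurrences of t, given the chars already seen
def repSeq (pre : List Char) : List Char → List Char
  | [] => []
  | d :: t => (if pre.contains d then [d] else []) ++ repSeq (pre ++ [d]) t

theorem aSide (t : List Char) : ∀ (pre : List Char) (acc : List Int),
    t.foldl
      (fun (st : PySem.Set Char × List Int) d =>
        if PySem.Set.contains st.1 d then (st.1, st.2 ++ [pyDigitInt d])
        else (PySem.Set.add st.1 d, st.2))
      (PySem.Set.ofList pre, acc)
    = (PySem.Set.ofList (pre ++ t), acc ++ (repSeq pre t).map pyDigitInt) := by
  induction t with
  | nil => intro pre acc; simp [repSeq]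
  | cons d t ih =>
    intro pre acc
    simp only [List.foldl_cons, repSeq]
    by_cases h : d ∈ pre
    · have hc : PySem.Set.contains (PySem.Set.ofList pre) d = true := by
        rw [PySem.Set.contains_iff, PySem.Set.mem_ofList]; exact h
      have hadd : PySem.Set.ofList (pre ++ [d]) = PySem.Set.ofList pre := by
        rw [PySem.Set.ofList_append_singleton, PySem.Set.add_of_mem]
        rw [PySem.Set.mem_ofList]; exact h
      have hpre : List.contains pre d = true := by simpa using h
      rw [hc]
      simp only [if_true]
      have hrec := ih (pre ++ [d]) (acc ++ [pyDigitInt d])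
      rw [hadd] at hrec
      rw [hrec, hpre]
      simp
    · have hc : PySem.Set.contains (PySem.Set.ofList pre) d = false := by
        rw [Bool.eq_false_iff]
        intro hcon
        rw [PySem.Set.contains_iff, PySem.Set.mem_ofList] at hcon
        exact h hcon
      have hpre : List.contains pre d = false := by simpa using h
      rw [hc]
      simp only [Bool.false_eq_true, if_false]
      rw [← PySem.Set.ofList_append_singleton]
      rw [ih (pre ++ [d]) acc, hpre]
      simp

theorem remStep_cons_self (d : Char) (r : List Char) : remStep (d :: r) d = r := by
  simp [remStep]

theorem remStep_cons_ne (x d : Char) (r : List Char) (h : x ≠ d) :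
    remStep (x :: r) d = x :: remStep r d := by
  unfold remStep
  rw [PySem.List.remove?_cons_of_ne r h]
  cases PySem.List.remove? r d <;> simp

theorem foldl_remStep_cons (ds : List Char) : ∀ (d : Char) (r : List Char),
    (∀ x ∈ ds, x ≠ d) → ds.foldl remStep (d :: r) = d :: ds.foldl remStep r := by
  induction ds with
  | nil => intro d r _; rfl
  | cons x ds ih =>
    intro d r h
    have hx : d ≠ x := fun he => h x (List.mem_cons_self) he.symm
    simp only [List.foldl_cons, remStep_cons_ne d x r hx]
    exact ih d _ (fun y hy => h y (List.mem_cons_of_mem _ hy))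

theorem foldl_add_mem (l : List Char) : ∀ (s : List Char) (d : Char), d ∈ s →
    l.foldl PySem.Set.add s = (l.filter (fun x => x ≠ d)).foldl PySem.Set.add s := by
  induction l with
  | nil => intro s d _; rfl
  | cons x l ih =>
    intro s d hd
    by_cases hx : x = d
    · subst hx
      have : PySem.Set.add s x = s := PySem.Set.add_of_mem hd
      simp only [List.foldl_cons, List.filter_cons, this]
      simp only [ne_eq, not_true_eq_false, decide_false, Bool.false_eq_true, if_false]
      exact ih s x hd
    · simp only [List.foldl_cons, List.filter_cons]
      simp only [ne_eq, hx, not_false_eq_true, decide_true, if_true, List.foldl_cons]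
      have hmem : d ∈ PySem.Set.add s x := by
        unfold PySem.Set.add
        split <;> simp [hd]
      exact ih _ d hmem

theorem foldl_add_head (m : List Char) : ∀ (s : List Char) (d : Char), d ∉ s →
    (∀ x ∈ m, x ≠ d) → m.foldl PySem.Set.add (d :: s) = d :: m.foldl PySem.Set.add s := by
  induction m with
  | nil => intro s d _ _; rfl
  | cons x m ih =>
    intro s d hds h
    have hx : x ≠ d := h x (List.mem_cons_self)
    have hcont : PySem.Set.contains (d :: s) x = PySem.Set.contains s x := by
      show (d :: s).contains x = s.contains x
      simp only [List.contains_eq_mem, List.mem_cons]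
      simp [hx]
    simp only [List.foldl_cons]
    unfold PySem.Set.add
    rw [hcont]
    split
    · exact ih s d hds (fun y hy => h y (List.mem_cons_of_mem _ hy))
    · have : d :: s ++ [x] = d :: (s ++ [x]) := by simp
      rw [this]
      apply ih (s ++ [x]) d
      · intro hc
        rcases List.mem_append.mp hc with h1 | h2
        · exact hds h1
        · exact hx (List.mem_singleton.mp h2).symm
      · exact fun y hy => h y (List.mem_cons_of_mem _ hy)

theorem ofList_cons_filter (d : Char) (l : List Char) :
    PySem.Set.ofList (d :: l) = d :: PySem.Set.ofList (l.filter (fun x => x ≠ d)) := by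
  rw [PySem.Set.ofList_eq_foldl, PySem.Set.ofList_eq_foldl]
  simp only [List.foldl_cons]
  have h0 : PySem.Set.add [] d = [d] := rfl
  rw [h0]
  rw [foldl_add_mem l [d] d (List.mem_singleton.mpr rfl)]
  have : ([d] : List Char) = d :: [] := rfl
  rw [this, foldl_add_head _ [] d (List.not_mem_nil)]
  intro x hx
  have := List.of_mem_filter hx
  simpa using this

theorem bCore (t : List Char) : ∀ (seen : List Char),
    (PySem.Set.ofList (t.filter (fun x => !seen.contains x))).foldl remStep t
      = repSeq seen t := by
  induction t with
  | nil => intro seen; rfl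
  | cons d t ih =>
    intro seen
    by_cases hd : d ∈ seen
    · have hc : seen.contains d = true := by simpa using hd
      have hfilter : (d :: t).filter (fun x => !seen.contains x)
          = t.filter (fun x => !(seen ++ [d]).contains x) := by
        rw [List.filter_cons]
        simp only [hc, Bool.not_true, Bool.false_eq_true, if_false]
        apply List.filter_congr
        intro x _
        by_cases hx : x = d
        · subst hx; simp [hd]
        · simp [hx]
      have hne : ∀ x ∈ PySem.Set.ofList (t.filter (fun x => !(seen ++ [d]).contains x)), x ≠ d := by
        intro x hx he
        subst he
        have hx2 := (PySem.Set.mem_ofList _ _).mp hx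
        have := List.of_mem_filter hx2
        simp at this
      rw [hfilter, foldl_remStep_cons _ d t hne]
      simp only [repSeq, hc, if_true]
      rw [ih (seen ++ [d])]
      simp
    · have hc : seen.contains d = false := by simp [hd]
      have hfilter : (d :: t).filter (fun x => !seen.contains x)
          = d :: t.filter (fun x => !seen.contains x) := by
        rw [List.filter_cons]; simp [hd]
      rw [hfilter, ofList_cons_filter]
      have hff : (t.filter (fun x => !seen.contains x)).filter (fun x => x ≠ d)
          = t.filter (fun x => !(seen ++ [d]).contains x) := by
        rw [List.filter_filter]
        apply List.filter_congr
        intro x _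
        by_cases hx : x = d
        · subst hx; simp
        · simp [hx]
      simp only [List.foldl_cons, remStep_cons_self]
      rw [hff, ih (seen ++ [d])]
      simp only [repSeq, hc, Bool.false_eq_true, if_false, List.nil_append]

-- ===== VERDICT (by name: the statement is the Claim_ definition above) =====
theorem digitos_repetidos_spec : Claim_equal_digitos_repetidos := by
  unfold Claim_equal_digitos_repetidos
  intro n _
  unfold Spec_digitos_repetidos digitos_repetidos digitos_repetidos_alt
  have hA := aSide (PySem.Int.toChars |n|) [] []
  simp only [List.nil_append] at hA
  have hB := bCore (PySem.Int.toChars |n|) []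
  simp only [List.contains_nil, Bool.not_false, List.filter_true] at hB
  have hempty : (PySem.Set.empty : PySem.Set Char) = PySem.Set.ofList [] := rfl
  show pySetList
      ((List.foldl _ (PySem.Set.empty, ([] : List Int)) (PySem.Int.toChars |n|)).2)
    = pySetList (List.map pyDigitInt
        (List.foldl remStep (PySem.Int.toChars |n|) (PySem.Set.ofList (PySem.Int.toChars |n|))))
  rw [hempty, hA, hB]
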